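-- pv_equiv track=rewrite | github.com/thierryxdp/TCC | problems/835/solution_352391.py | melhor_volta
-- ===== SOURCE A (Python) =====
-- def melhor_volta(matriz):
--     '''funcao que, dada uma matriz 6x10, retorna uma tupla, informando o dono da melhor volta, o tempo e em qual volta;
--     list -> tuple'''
--     melhores_voltas=[]
--     for i in range(0,6):
--         melhores_voltas=melhores_voltas+[min(matriz[i])]
--
--     for i in range(0,6):
--         for j in range(0,10):
--             if min(melhores_voltas)==matriz[i][j]:
--                 return (i+1,min(melhores_voltas),j+1)
-- ===== SOURCE B (Python) =====
-- def melhor_volta(matriz):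
--     '''funcao que, dada uma matriz 6x10, retorna uma tupla, informando o dono da melhor volta, o tempo e em qual volta;
--     list -> tuple'''
--     best = matriz[0][0]
--     best_i = 0
--     best_j = 0
--     for i in range(0, 6):
--         linha = matriz[i]
--         for j in range(0, min(10, len(linha))):
--             if linha[j] < best:
--                 best = linha[j]
--                 best_i = i
--                 best_j = j
--     return (best_i + 1, best, best_j + 1)
-- ===== Notes on version B (the rewrite author's own statement) =====
-- stated objective: simpler
-- what changed: Replaces A's two-phase scheme (build the list of the six row minima, then rescan the matrix comparing every cell against the minimum of that list, recomputed per cell) with a single row-major pass over the cells that exist, tracking the best time and its position in one accumulator; strict '<' keeps the first row-major occurrence on ties exactly as A does. …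
import Mathlib
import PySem

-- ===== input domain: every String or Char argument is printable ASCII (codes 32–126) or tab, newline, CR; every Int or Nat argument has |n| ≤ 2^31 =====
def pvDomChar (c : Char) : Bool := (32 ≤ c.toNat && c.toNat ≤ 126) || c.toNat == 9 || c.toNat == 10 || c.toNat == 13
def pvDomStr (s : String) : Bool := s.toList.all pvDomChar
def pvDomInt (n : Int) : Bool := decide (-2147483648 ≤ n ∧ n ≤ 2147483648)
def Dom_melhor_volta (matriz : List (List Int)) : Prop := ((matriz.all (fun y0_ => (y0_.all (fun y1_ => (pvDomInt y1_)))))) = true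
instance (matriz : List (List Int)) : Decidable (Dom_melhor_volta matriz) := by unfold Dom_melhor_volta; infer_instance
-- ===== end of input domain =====

-- B replaces A's two scans (build the row-minima list, then rescan every cell against its minimum)
-- with a single row-major pass over the cells that exist, tracking the best time and its position;
-- objective: simpler.

-- ===== PORT A =====
def melhor_volta (matriz : List (List Int)) : Int × Int × Int :=
  let melhores_voltas : List Int :=
    (PySem.List.pyRange 0 6 1).foldl
      (fun mv i =>
        mv ++ [(PySem.List.min? ((PySem.List.pyGet? matriz i).getD []) (fun x => x)).getD 0]) []
  (((PySem.List.pyRange 0 6 1).findSome? fun i =>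
      (PySem.List.pyRange 0 10 1).findSome? fun j =>
        if (PySem.List.min? melhores_voltas (fun x => x)).getD 0
            = (PySem.List.pyGet? ((PySem.List.pyGet? matriz i).getD []) j).getD 0 then
          some (i + 1, (PySem.List.min? melhores_voltas (fun x => x)).getD 0, j + 1)
        else none)).getD (0, 0, 0)

-- ===== PORT B =====
def melhor_volta_alt (matriz : List (List Int)) : Int × Int × Int :=
  let st : Int × Int × Int :=
    (PySem.List.pyRange 0 6 1).foldl
      (fun st i =>
        let linha := (PySem.List.pyGet? matriz i).getD []
        (PySem.List.pyRange 0 (min 10 (linha.length : Int)) 1).foldl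
          (fun (st : Int × Int × Int) j =>
            if (PySem.List.pyGet? linha j).getD 0 < st.1
            then ((PySem.List.pyGet? linha j).getD 0, i, j) else st) st)
      ((PySem.List.pyGet? ((PySem.List.pyGet? matriz 0).getD []) 0).getD 0, 0, 0)
  (st.2.1 + 1, st.1, st.2.2 + 1)

-- ===== PRECONDITION & SPEC =====
-- Pre_ holds exactly when the Python A returns a tuple: at least 6 rows, the first six non-empty
-- (else min([]) raises ValueError or matriz[i] raises IndexError), and the overall best time of the
-- first six rows reachable by A's scan — attained at an existing cell (i, j) with j < 10 and every
-- earlier row at least 10 wide (else A raises IndexError scanning past the end of a short row, or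
-- finishes both loops without a match and returns None, which is not a value of the declared type).
def Pre_melhor_volta (matriz : List (List Int)) : Prop :=
  6 ≤ matriz.length ∧ (∀ r ∈ matriz.take 6, r ≠ []) ∧
  ∃ i : Nat, i < 6 ∧ ∃ j : Nat, j < 10 ∧ j < (matriz.getD i []).length ∧
    (∀ i' : Nat, i' < i → 10 ≤ (matriz.getD i' []).length) ∧
    ∀ r ∈ matriz.take 6, ∀ x ∈ r, (matriz.getD i []).getD j 0 ≤ x
instance (matriz : List (List Int)) : Decidable (Pre_melhor_volta matriz) := by
  unfold Pre_melhor_volta; infer_instance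

def pvWitness_melhor_volta : List (List Int) :=
  [[15, 12, 13, 14, 16, 16, 17, 18, 19, 20],
   [41, 42, 43, 44, 45, 46, 47, 48, 49, 50],
   [21, 22, 23, 24, 11, 26, 27, 28, 29, 30],
   [51, 52, 53, 54, 55, 56, 57, 58, 59, 60],
   [31, 32, 33, 34, 35, 36, 37, 38, 39, 40],
   [61, 62, 63, 64, 65, 66, 67, 68, 69, 70]]

def Spec_melhor_volta (matriz : List (List Int)) (out : Int × Int × Int) : Prop := out = melhor_volta_alt matriz
instance (matriz : List (List Int)) (out : Int × Int × Int) : Decidable (Spec_melhor_volta matriz out) := by unfold Spec_melhor_volta; infer_instance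

-- ===== CLAIM (what is proved, stated in full; the proofs are below) =====
def Claim_equal_melhor_volta : Prop := ∀ (matriz : List (List Int)), Dom_melhor_volta matriz → Pre_melhor_volta matriz → Spec_melhor_volta matriz (melhor_volta matriz)

-- ===== LEMMAS AND PROOFS =====

-- the cell read both ports perform, a row's minimum, and the row-major (i, j, value) triples
def pvCell (r : List Int) (j : Int) : Int := (PySem.List.pyGet? r j).getD 0

def pvGmin (r : List Int) : Int := (PySem.List.min? r (fun x => x)).getD 0

def pvBlock (i : Int) (r : List Int) : List (Int × Int × Int) :=
  (PySem.List.pyRange 0 (min 10 (r.length : Int)) 1).map (fun j => (i, j, pvCell r j))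

def pvStep (st : Int × Int × Int) (t : Int × Int × Int) : Int × Int × Int :=
  if t.2.2 < st.1 then (t.2.2, t.1, t.2.1) else st

lemma pvFoldlMinLe (l : List Int) (v : Int) : l.foldl min v ≤ v := by
  induction l generalizing v with
  | nil => simp
  | cons a t ih => exact le_trans (ih (min v a)) (by omega)

-- the argmin invariant: B's fold computes the running minimum together with the
-- row-major-first position attaining it, and a first-match search finds that position
lemma pvKey (q : List (Int × Int × Int)) : ∀ (v i j : Int),
    ∃ bi bj,
      q.foldl pvStep (v, i, j) = ((q.map (fun t => t.2.2)).foldl min v, bi, bj) ∧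
      ((i, j, v) :: q).findSome?
          (fun t => if (q.map (fun t => t.2.2)).foldl min v = t.2.2
                    then some (t.1 + 1, (q.map (fun t => t.2.2)).foldl min v, t.2.1 + 1) else none)
        = some (bi + 1, (q.map (fun t => t.2.2)).foldl min v, bj + 1) := by
  induction q with
  | nil =>
      intro v i j
      exact ⟨i, j, by simp [List.findSome?]⟩
  | cons t q ih =>
      intro v i j
      obtain ⟨i', j', v'⟩ := t
      by_cases hlt : v' < v
      · obtain ⟨bi, bj, h1, h2⟩ := ih v' i' j'
        refine ⟨bi, bj, ?_, ?_⟩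
        · simpa [pvStep, hlt, min_eq_right (le_of_lt hlt)] using h1
        · have hm : (q.map (fun t => t.2.2)).foldl min v' ≤ v' := pvFoldlMinLe _ _
          have hne : (q.map (fun t => t.2.2)).foldl min (min v v') ≠ v := by
            rw [min_eq_right (le_of_lt hlt)]; omega
          simp only [List.findSome?_cons, List.map_cons, List.foldl]
          simp only [hne, if_false]
          simpa [min_eq_right (le_of_lt hlt), List.findSome?_cons] using h2
      · obtain ⟨bi, bj, h1, h2⟩ := ih v i j
        have hle : v ≤ v' := by omega
        have hmin : min v v' = v := min_eq_left hle
        refine ⟨bi, bj, ?_, ?_⟩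
        · simpa [pvStep, hlt, hmin] using h1
        · have hm : (q.map (fun t => t.2.2)).foldl min v ≤ v := pvFoldlMinLe _ _
          simp only [List.findSome?_cons, List.map_cons, List.foldl, hmin] at h2 ⊢
          by_cases hv : (q.map (fun t => t.2.2)).foldl min v = v
          · simpa [hv] using h2
          · have hv' : (q.map (fun t => t.2.2)).foldl min v ≠ v' := by omega
            simp only [hv, if_false] at h2
            simpa [hv, hv'] using h2

-- a fold of min lands on m when m is a lower bound that is attained
lemma pvFoldlMinEq (m : Int) : ∀ (l : List Int) (v : Int), m ≤ v → (∀ x ∈ l, m ≤ x) →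
    (m = v ∨ m ∈ l) → l.foldl min v = m
  | [], v, hv, _, hor => by
      rcases hor with h | h
      · simpa using h.symm
      · simp at h
  | a :: l, v, hv, hl, hor => by
      have ha : m ≤ a := hl a (by simp)
      have hma : m ≤ min v a := le_min hv ha
      simp only [List.foldl]
      refine pvFoldlMinEq m l (min v a) hma (fun x hx => hl x (by simp [hx])) ?_
      rcases hor with h | h
      · left; omega
      · rcases List.mem_cons.mp h with h | h
        · left; omega
        · right; exact h

-- the minimum of a non-empty row: a member that bounds the row from below
lemma pvGminSpec (r : List Int) (h : r ≠ []) : pvGmin r ∈ r ∧ ∀ y ∈ r, pvGmin r ≤ y := by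
  cases hmr : PySem.List.min? r (fun x => x) with
  | none => exact absurd ((PySem.List.min?_eq_none_iff r (fun x => x)).mp hmr) h
  | some mk =>
      have hg : pvGmin r = mk := by simp [pvGmin, hmr]
      exact ⟨hg ▸ PySem.List.min?_mem hmr, fun y hy => hg ▸ PySem.List.min?_isMin hmr y hy⟩

-- a scanned cell is a real element of its row
lemma pvCellMem (r : List Int) (j : Int) (h0 : 0 ≤ j) (h : j < min 10 (r.length : Int)) :
    pvCell r j ∈ r := by
  have hjl : j.toNat < r.length := by omega
  rw [pvCell, PySem.List.pyGet?_of_nonneg r h0, List.getElem?_eq_getElem hjl]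
  exact List.getElem_mem _

-- a scanned cell as a getD read at a Nat index
lemma pvCellGetD (r : List Int) (j : Nat) (h : j < r.length) :
    pvCell r (j : Int) = r.getD j 0 := by
  rw [pvCell, PySem.List.pyGet?_natCast, List.getElem?_eq_getElem h, List.getD_eq_getElem r 0 h]
  rfl

-- first-match search over a strictly increasing index list
lemma pvFindFirst {γ : Type} (f : Int → Option γ) (out : γ) (j : Int) :
    ∀ l : List Int, l.Pairwise (· < ·) → j ∈ l → f j = some out →
      (∀ x ∈ l, x < j → f x = none) → l.findSome? f = some out
  | [], _, hj, _, _ => absurd hj (by simp)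
  | a :: l, hp, hj, hfj, hnone => by
      rcases List.mem_cons.mp hj with h | h
      · subst h
        simp [hfj]
      · have haj : a < j := (List.pairwise_cons.mp hp).1 j h
        have hfa : f a = none := hnone a (by simp) haj
        simp only [List.findSome?_cons, hfa]
        exact pvFindFirst f out j l (List.pairwise_cons.mp hp).2 h hfj
          (fun x hx => hnone x (by simp [hx]))

lemma pvFoldCongr (f f' : (Int × Int × Int) → Int → (Int × Int × Int)) :
    ∀ (l : List Int) (st : Int × Int × Int), (∀ i ∈ l, ∀ st, f st i = f' st i) →
      l.foldl f st = l.foldl f' st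
  | [], _, _ => rfl
  | a :: l, st, h => by
      simp only [List.foldl_cons, h a (by simp)]
      exact pvFoldCongr f f' l _ (fun i hi => h i (by simp [hi]))

lemma pvFindAppend {γ : Type} (F : Int × Int × Int → Option γ) :
    ∀ l1 l2 : List (Int × Int × Int),
      (l1 ++ l2).findSome? F =
        (match l1.findSome? F with | some b => some b | none => l2.findSome? F)
  | [], _ => rfl
  | a :: l1, l2 => by
      simp only [List.cons_append, List.findSome?_cons]
      cases F a with
      | none => exact pvFindAppend F l1 l2
      | some b => rfl

-- first-match search through a flattened family of blocks
lemma pvFindFlat {γ : Type} (g : Int → List (Int × Int × Int)) (F : Int × Int × Int → Option γ)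
    (out : γ) (i0 : Int) :
    ∀ l : List Int, l.Pairwise (· < ·) → i0 ∈ l → (g i0).findSome? F = some out →
      (∀ x ∈ l, x < i0 → (g x).findSome? F = none) → (l.flatMap g).findSome? F = some out
  | [], _, hj, _, _ => absurd hj (by simp)
  | a :: l, hp, hj, hfj, hnone => by
      rcases List.mem_cons.mp hj with h | h
      · subst h
        rw [List.flatMap_cons, pvFindAppend, hfj]
      · have haj : a < i0 := (List.pairwise_cons.mp hp).1 i0 h
        rw [List.flatMap_cons, pvFindAppend, hnone a (by simp) haj]
        exact pvFindFlat g F out i0 l (List.pairwise_cons.mp hp).2 h hfj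
          (fun x hx => hnone x (by simp [hx]))

lemma pvFoldFlat (g : Int → List (Int × Int × Int)) :
    ∀ (idx : List Int) (st : Int × Int × Int),
      idx.foldl (fun st i => (g i).foldl pvStep st) st = (idx.flatMap g).foldl pvStep st
  | [], _ => rfl
  | a :: idx, st => by
      simp only [List.foldl_cons, List.flatMap_cons, List.foldl_append]
      exact pvFoldFlat g idx _

-- B's inner loop over j is the fold of pvStep over the row's block
lemma pvInnerFold (r : List Int) (i : Int) (st : Int × Int × Int) :
    (PySem.List.pyRange 0 (min 10 (r.length : Int)) 1).foldl
      (fun (st : Int × Int × Int) j =>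
        if (PySem.List.pyGet? r j).getD 0 < st.1 then ((PySem.List.pyGet? r j).getD 0, i, j) else st) st
      = (pvBlock i r).foldl pvStep st := by
  simp [pvBlock, List.foldl_map, pvStep, pvCell]

-- the values carried by a block are real elements of its row
lemma pvBlockValMem (i : Int) (r : List Int) :
    ∀ x ∈ (pvBlock i r).map (fun t => t.2.2), x ∈ r := by
  intro x hx
  simp only [pvBlock, List.map_map, List.mem_map, Function.comp] at hx
  obtain ⟨j, hj, rfl⟩ := hx
  have := PySem.List.mem_pyRange_one.mp hj
  exact pvCellMem r j this.1 this.2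

-- rows of the destructured matrix, as getD reads
lemma pvRowEq (r0 r1 r2 r3 r4 r5 : List Int) (rest : List (List Int)) (i : Nat) (h : i < 6) :
    (r0 :: r1 :: r2 :: r3 :: r4 :: r5 :: rest).getD i [] = [r0, r1, r2, r3, r4, r5].getD i [] := by
  interval_cases i <;> rfl

lemma pvRowGet (matriz : List (List Int)) (i : Nat) (h : i < matriz.length) :
    (PySem.List.pyGet? matriz ((i : Nat) : Int)).getD [] = matriz.getD i [] := by
  rw [PySem.List.pyGet?_natCast, List.getElem?_eq_getElem h, List.getD_eq_getElem matriz [] h]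
  rfl

lemma pvRowMem (rows : List (List Int)) (i : Nat) (h : i < rows.length) :
    rows.getD i [] ∈ rows := by
  rw [List.getD_eq_getElem rows [] h]
  exact List.getElem_mem _

lemma pvMemSix (x : Int) (hx : x ∈ ([0, 1, 2, 3, 4, 5] : List Int)) : 0 ≤ x ∧ x < 6 := by
  fin_cases hx <;> norm_num

lemma pvNatMemSix (n : Nat) (h : n < 6) : ((n : Nat) : Int) ∈ ([0, 1, 2, 3, 4, 5] : List Int) := by
  interval_cases n <;> decide

-- the main equivalence on one destructured matrix: the overall minimum M sits at the
-- row-major-first scanned cell (i0, j0), every earlier row is at least 10 wide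
lemma pvMain (r0 r1 r2 r3 r4 r5 : List Int) (rest : List (List Int))
    (hne : ∀ r ∈ [r0, r1, r2, r3, r4, r5], r ≠ [])
    (i0 j0 : Nat) (hi6 : i0 < 6) (hj10 : j0 < 10)
    (hjlen : j0 < ([r0, r1, r2, r3, r4, r5].getD i0 []).length)
    (hrows10 : ∀ i : Nat, i < i0 → 10 ≤ ([r0, r1, r2, r3, r4, r5].getD i []).length)
    (hlow : ∀ r ∈ [r0, r1, r2, r3, r4, r5], ∀ x ∈ r,
      ([r0, r1, r2, r3, r4, r5].getD i0 []).getD j0 0 ≤ x)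
    (hfirstR : ∀ i : Nat, i < i0 → ∀ j : Nat, j < 10 →
      ([r0, r1, r2, r3, r4, r5].getD i []).getD j 0 ≠ ([r0, r1, r2, r3, r4, r5].getD i0 []).getD j0 0)
    (hfirstC : ∀ j : Nat, j < j0 →
      ([r0, r1, r2, r3, r4, r5].getD i0 []).getD j 0 ≠ ([r0, r1, r2, r3, r4, r5].getD i0 []).getD j0 0) :
    melhor_volta (r0 :: r1 :: r2 :: r3 :: r4 :: r5 :: rest)
      = melhor_volta_alt (r0 :: r1 :: r2 :: r3 :: r4 :: r5 :: rest) := by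
  set matriz := r0 :: r1 :: r2 :: r3 :: r4 :: r5 :: rest with hmz
  set rows : List (List Int) := [r0, r1, r2, r3, r4, r5] with hrows
  set M : Int := (rows.getD i0 []).getD j0 0 with hM
  have hmlen : 6 ≤ matriz.length := by rw [hmz]; simp
  -- the row read by either port at a scanned index
  have hrow : ∀ i : Nat, i < 6 → (PySem.List.pyGet? matriz ((i : Nat) : Int)).getD [] = rows.getD i [] := by
    intro i hi
    rw [pvRowGet matriz i (by omega), hmz, hrows, pvRowEq]
    exact hi
  have hr6 : PySem.List.pyRange 0 6 1 = [0, 1, 2, 3, 4, 5] := by decide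
  have hne0 : r0 ≠ [] := hne r0 (by simp [hrows])
  have hlen0 : 0 < r0.length := List.length_pos_of_ne_nil hne0
  have e0 : (PySem.List.pyGet? matriz (0 : Int)).getD [] = r0 := by
    rw [show (0:Int) = ((0:Nat):Int) by norm_num, hrow 0 (by omega)]; simp [hrows]
  have e1 : (PySem.List.pyGet? matriz (1 : Int)).getD [] = r1 := by
    rw [show (1:Int) = ((1:Nat):Int) by norm_num, hrow 1 (by omega)]; simp [hrows]
  have e2 : (PySem.List.pyGet? matriz (2 : Int)).getD [] = r2 := by
    rw [show (2:Int) = ((2:Nat):Int) by norm_num, hrow 2 (by omega)]; simp [hrows]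
  have e3 : (PySem.List.pyGet? matriz (3 : Int)).getD [] = r3 := by
    rw [show (3:Int) = ((3:Nat):Int) by norm_num, hrow 3 (by omega)]; simp [hrows]
  have e4 : (PySem.List.pyGet? matriz (4 : Int)).getD [] = r4 := by
    rw [show (4:Int) = ((4:Nat):Int) by norm_num, hrow 4 (by omega)]; simp [hrows]
  have e5 : (PySem.List.pyGet? matriz (5 : Int)).getD [] = r5 := by
    rw [show (5:Int) = ((5:Nat):Int) by norm_num, hrow 5 (by omega)]; simp [hrows]
  simp only [melhor_volta, melhor_volta_alt, hr6]
  -- phase 1 of A: the list of row minima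
  have hmv : List.foldl
      (fun mv i =>
        mv ++ [(PySem.List.min? ((PySem.List.pyGet? matriz i).getD []) (fun x => x)).getD 0])
      [] [0, 1, 2, 3, 4, 5]
      = rows.map pvGmin := by
    simp only [List.foldl_cons, List.foldl_nil, e0, e1, e2, e3, e4, e5, hrows]
    simp [pvGmin]
  rw [hmv]
  -- M is a member of its row, which is a member of rows
  have hRmem : rows.getD i0 [] ∈ rows := pvRowMem rows i0 (by rw [hrows]; simpa using hi6)
  have hmem0 : M ∈ rows.getD i0 [] := by
    rw [hM, List.getD_eq_getElem _ 0 hjlen]; exact List.getElem_mem _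
  -- the minimum A computes over the row minima is M
  have hmA : (PySem.List.min? (rows.map pvGmin) (fun x => x)).getD 0 = M := by
    show pvGmin (rows.map pvGmin) = M
    have gA := pvGminSpec (rows.map pvGmin) (by rw [hrows]; simp)
    refine le_antisymm ?_ ?_
    · have hi0' : pvGmin (rows.getD i0 []) ≤ M :=
        (pvGminSpec _ (hne _ hRmem)).2 M hmem0
      exact le_trans (gA.2 _ (List.mem_map_of_mem hRmem)) hi0'
    · obtain ⟨r, hr, hrg⟩ := List.mem_map.mp gA.1
      rw [← hrg]
      exact hlow r hr _ (pvGminSpec r (hne r hr)).1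
  rw [hmA]
  -- A finds the best lap at row i0, column j0, the first row-major occurrence of M
  have hrowNone : ∀ x ∈ ([0, 1, 2, 3, 4, 5] : List Int), x < ((i0 : Nat) : Int) →
      (PySem.List.pyRange 0 10 1).findSome?
        (fun j => if M = (PySem.List.pyGet? ((PySem.List.pyGet? matriz x).getD []) j).getD 0
                  then some (x + 1, M, j + 1) else none) = none := by
    intro x hx hxlt
    obtain ⟨hx0, _⟩ := pvMemSix x hx
    have hxe : ((x.toNat : Nat) : Int) = x := by omega
    have hxi : x.toNat < i0 := by omega
    rw [← hxe, hrow x.toNat (by omega)]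
    refine List.findSome?_eq_none_iff.mpr ?_
    intro j hj
    have hjm := PySem.List.mem_pyRange_one.mp hj
    have hjlen' : j.toNat < (rows.getD x.toNat []).length := by
      have := hrows10 x.toNat hxi; omega
    have hje : ((j.toNat : Nat) : Int) = j := by omega
    have hcell := pvCellGetD (rows.getD x.toNat []) j.toNat hjlen'
    rw [pvCell] at hcell
    rw [hje] at hcell
    rw [hcell]
    exact if_neg (fun h => hfirstR x.toNat hxi j.toNat (by omega) h.symm)
  have hrowSome : (PySem.List.pyRange 0 10 1).findSome?
      (fun j => if M = (PySem.List.pyGet? ((PySem.List.pyGet? matriz ((i0 : Nat) : Int)).getD []) j).getD 0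
                then some (((i0 : Nat) : Int) + 1, M, j + 1) else none)
      = some (((i0 : Nat) : Int) + 1, M, ((j0 : Nat) : Int) + 1) := by
    rw [hrow i0 hi6]
    refine pvFindFirst _ _ ((j0 : Nat) : Int) _ (PySem.List.pairwise_lt_pyRange_one 0 10)
      (PySem.List.mem_pyRange_one.mpr ⟨by omega, by omega⟩) ?_ ?_
    · rw [if_pos (by rw [← pvCellGetD _ j0 hjlen, pvCell] at hM; exact hM)]
    · intro x hx hxlt
      have hx0 : 0 ≤ x := (PySem.List.mem_pyRange_one.mp hx).1
      have hxj : x.toNat < j0 := by omega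
      have hxe : ((x.toNat : Nat) : Int) = x := by omega
      have hcell := pvCellGetD (rows.getD i0 []) x.toNat (by omega)
      rw [pvCell] at hcell
      rw [hxe] at hcell
      rw [hcell]
      exact if_neg (fun h => hfirstC x.toNat hxj h.symm)
  have hA0 : List.findSome?
      (fun i => (PySem.List.pyRange 0 10 1).findSome?
        (fun j => if M = (PySem.List.pyGet? ((PySem.List.pyGet? matriz i).getD []) j).getD 0
                  then some (i + 1, M, j + 1) else none))
      ([0, 1, 2, 3, 4, 5] : List Int)
      = some (((i0 : Nat) : Int) + 1, M, ((j0 : Nat) : Int) + 1) :=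
    pvFindFirst _ _ ((i0 : Nat) : Int) _ (by decide) (pvNatMemSix i0 hi6) hrowSome hrowNone
  -- B's loop is the fold of pvStep over the existing cells in row-major order
  have hB1 : ∀ st : Int × Int × Int, List.foldl
      (fun (st : Int × Int × Int) i => List.foldl
        (fun (st : Int × Int × Int) j =>
          if (PySem.List.pyGet? ((PySem.List.pyGet? matriz i).getD []) j).getD 0 < st.1
          then ((PySem.List.pyGet? ((PySem.List.pyGet? matriz i).getD []) j).getD 0, i, j)
          else st)
        st (PySem.List.pyRange 0 (min 10 ((((PySem.List.pyGet? matriz i).getD []).length : Int))) 1))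
      st ([0, 1, 2, 3, 4, 5] : List Int)
      = List.foldl
          (fun st i => (pvBlock i ((PySem.List.pyGet? matriz i).getD [])).foldl pvStep st)
          st ([0, 1, 2, 3, 4, 5] : List Int) := fun st =>
    pvFoldCongr _ _ _ st (fun i _ st => pvInnerFold ((PySem.List.pyGet? matriz i).getD []) i st)
  have hB2 : ∀ st : Int × Int × Int, List.foldl
      (fun st i => (pvBlock i ((PySem.List.pyGet? matriz i).getD [])).foldl pvStep st)
      st ([0, 1, 2, 3, 4, 5] : List Int)
      = (([0, 1, 2, 3, 4, 5] : List Int).flatMap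
          (fun i => pvBlock i ((PySem.List.pyGet? matriz i).getD []))).foldl pvStep st :=
    fun st => pvFoldFlat _ _ st
  rw [hB1, hB2]
  rw [show (PySem.List.pyGet? ((PySem.List.pyGet? matriz (0:Int)).getD []) (0:Int)).getD 0 = pvCell r0 0 from by
    simp [e0, pvCell]]
  set L : List (Int × Int × Int) :=
    (([0, 1, 2, 3, 4, 5] : List Int).flatMap
      (fun i => pvBlock i ((PySem.List.pyGet? matriz i).getD []))) with hL
  -- peel the first cell of row 0's block: L = head :: q
  have hminpos : (0:Int) < min 10 (r0.length : Int) := by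
    have : (1:Int) ≤ (r0.length : Int) := by exact_mod_cast hlen0
    omega
  have hb0 : pvBlock 0 r0
      = ((0:Int), (0:Int), pvCell r0 0) ::
        (PySem.List.pyRange (0 + 1) (min 10 (r0.length : Int)) 1).map (fun j => ((0:Int), j, pvCell r0 j)) := by
    rw [pvBlock, PySem.List.pyRange_one_cons hminpos, List.map_cons]
  have hLcons : L = ((0:Int), (0:Int), pvCell r0 0) ::
      ((PySem.List.pyRange (0 + 1) (min 10 (r0.length : Int)) 1).map (fun j => ((0:Int), j, pvCell r0 j))
        ++ (([1, 2, 3, 4, 5] : List Int).flatMap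
            (fun i => pvBlock i ((PySem.List.pyGet? matriz i).getD [])))) := by
    rw [hL, List.flatMap_cons, e0, hb0, List.cons_append]
  set q : List (Int × Int × Int) :=
    ((PySem.List.pyRange (0 + 1) (min 10 (r0.length : Int)) 1).map (fun j => ((0:Int), j, pvCell r0 j))
      ++ (([1, 2, 3, 4, 5] : List Int).flatMap
          (fun i => pvBlock i ((PySem.List.pyGet? matriz i).getD [])))) with hq
  -- every value scanned by B is a real cell, hence ≥ M
  have hLval : ∀ x ∈ L.map (fun t => t.2.2), M ≤ x := by
    intro x hx
    rw [hL, List.map_flatMap] at hx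
    obtain ⟨i, hi, hxi⟩ := List.mem_flatMap.mp hx
    obtain ⟨hi0, hi6'⟩ := pvMemSix i hi
    have hie : ((i.toNat : Nat) : Int) = i := by omega
    rw [← hie, hrow i.toNat (by omega)] at hxi
    exact hlow _ (pvRowMem rows i.toNat (by rw [hrows]; simp; omega)) x
      (pvBlockValMem _ _ x hxi)
  -- M is attained among the scanned values
  have hMin : M ∈ L.map (fun t => t.2.2) := by
    rw [hL, List.map_flatMap]
    refine List.mem_flatMap.mpr ⟨((i0 : Nat) : Int), pvNatMemSix i0 hi6, ?_⟩
    rw [hrow i0 hi6]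
    simp only [pvBlock, List.map_map, List.mem_map, Function.comp]
    refine ⟨((j0 : Nat) : Int), PySem.List.mem_pyRange_one.mpr ⟨by omega, by omega⟩, ?_⟩
    rw [pvCellGetD _ j0 hjlen, hM]
  obtain ⟨bi, bj, hfold, hfind⟩ := pvKey q (pvCell r0 0) 0 0
  -- the running minimum over the scanned cells is M
  have hMq : (q.map (fun t => t.2.2)).foldl min (pvCell r0 0) = M := by
    have hhead : M ≤ pvCell r0 0 := by
      have : pvCell r0 0 ∈ L.map (fun t => t.2.2) := by rw [hLcons]; simp
      exact hLval _ this
    refine pvFoldlMinEq M _ _ hhead ?_ ?_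
    · intro x hx
      refine hLval x ?_
      rw [hLcons, List.map_cons]
      exact List.mem_cons_of_mem _ hx
    · have := hMin
      rw [hLcons, List.map_cons, List.mem_cons] at this
      rcases this with h | h
      · left; exact h
      · right; exact h
  rw [hMq] at hfold hfind
  -- the first scanned triple carrying M is (i0, j0, M)
  have hdir : (((0:Int), (0:Int), pvCell r0 0) :: q).findSome?
      (fun t => if M = t.2.2 then some (t.1 + 1, M, t.2.1 + 1) else none)
      = some (((i0 : Nat) : Int) + 1, M, ((j0 : Nat) : Int) + 1) := by
    rw [← hLcons, hL]
    refine pvFindFlat _ _ _ ((i0 : Nat) : Int) _ (by decide) (pvNatMemSix i0 hi6) ?_ ?_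
    · -- block i0 finds (i0, j0, M) first
      rw [hrow i0 hi6, pvBlock, List.findSome?_map]
      refine pvFindFirst _ _ ((j0 : Nat) : Int) _ (PySem.List.pairwise_lt_pyRange_one _ _)
        (PySem.List.mem_pyRange_one.mpr ⟨by omega, by omega⟩) ?_ ?_
      · show (if M = pvCell (rows.getD i0 []) ((j0 : Nat) : Int) then
            some (((i0 : Nat) : Int) + 1, M, ((j0 : Nat) : Int) + 1) else none) = _
        rw [if_pos (by rw [pvCellGetD _ j0 hjlen, hM])]
      · intro x hx hxlt
        have hxm := PySem.List.mem_pyRange_one.mp hx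
        show (if M = pvCell (rows.getD i0 []) x then
            some (((i0 : Nat) : Int) + 1, M, x + 1) else none) = none
        refine if_neg (fun heq => ?_)
        have hxj : x.toNat < j0 := by omega
        have hxe : ((x.toNat : Nat) : Int) = x := by omega
        refine hfirstC x.toNat hxj ?_
        rw [← pvCellGetD _ x.toNat (by omega), hxe]
        exact heq.symm
    · -- blocks before i0 carry no cell equal to M
      intro x hx hxlt
      obtain ⟨hx0, _⟩ := pvMemSix x hx
      have hxe : ((x.toNat : Nat) : Int) = x := by omega
      have hxi : x.toNat < i0 := by omega
      rw [← hxe, hrow x.toNat (by omega), pvBlock, List.findSome?_map]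
      refine List.findSome?_eq_none_iff.mpr ?_
      intro j hj
      have hjm := PySem.List.mem_pyRange_one.mp hj
      have hjlen' : j.toNat < (rows.getD x.toNat []).length := by omega
      have hje : ((j.toNat : Nat) : Int) = j := by omega
      show (if M = pvCell (rows.getD x.toNat []) j then
          some (((x.toNat : Nat) : Int) + 1, M, j + 1) else none) = none
      refine if_neg (fun heq => ?_)
      refine hfirstR x.toNat hxi j.toNat (by omega) ?_
      rw [← pvCellGetD _ j.toNat hjlen', hje]
      exact heq.symm
  rw [hfind] at hdir
  -- assemble both sides
  simp only [hA0]
  rw [hLcons, List.foldl_cons]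
  rw [show pvStep (pvCell r0 0, 0, 0) ((0:Int), (0:Int), pvCell r0 0) = (pvCell r0 0, 0, 0) from by
    simp [pvStep]]
  rw [hfold]
  simp only [Option.some.injEq, Prod.mk.injEq] at hdir
  obtain ⟨hbi, -, hbj⟩ := hdir
  simp only [Option.getD_some]
  rw [← hbi, ← hbj]


theorem melhor_volta_spec : Claim_equal_melhor_volta := by
  intro matriz _ hpre
  obtain ⟨hlen, hne, hex⟩ := hpre
  obtain ⟨r0, matriz, rfl⟩ := List.exists_cons_of_ne_nil (show matriz ≠ [] from List.ne_nil_of_length_pos (by omega))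
  obtain ⟨r1, matriz, rfl⟩ := List.exists_cons_of_ne_nil (show matriz ≠ [] from List.ne_nil_of_length_pos (by simp at hlen; omega))
  obtain ⟨r2, matriz, rfl⟩ := List.exists_cons_of_ne_nil (show matriz ≠ [] from List.ne_nil_of_length_pos (by simp at hlen; omega))
  obtain ⟨r3, matriz, rfl⟩ := List.exists_cons_of_ne_nil (show matriz ≠ [] from List.ne_nil_of_length_pos (by simp at hlen; omega))
  obtain ⟨r4, matriz, rfl⟩ := List.exists_cons_of_ne_nil (show matriz ≠ [] from List.ne_nil_of_length_pos (by simp at hlen; omega))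
  obtain ⟨r5, matriz, rfl⟩ := List.exists_cons_of_ne_nil (show matriz ≠ [] from List.ne_nil_of_length_pos (by simp at hlen; omega))
  have htake : (r0 :: r1 :: r2 :: r3 :: r4 :: r5 :: matriz).take 6 = [r0, r1, r2, r3, r4, r5] := rfl
  rw [htake] at hne hex
  -- rewrite the getD reads of the existential through the first six rows
  have hget : ∀ i : Nat, i < 6 →
      (r0 :: r1 :: r2 :: r3 :: r4 :: r5 :: matriz).getD i [] = [r0, r1, r2, r3, r4, r5].getD i [] :=
    pvRowEq r0 r1 r2 r3 r4 r5 matriz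
  classical
  set rows : List (List Int) := [r0, r1, r2, r3, r4, r5] with hrows
  -- encode (i, j) as 10*i + j and take the row-major-least scanned cell attaining the minimum
  have hexP : ∃ k : Nat, k < 60 ∧ k % 10 < (rows.getD (k / 10) []).length ∧
      (∀ i' : Nat, i' < k / 10 → 10 ≤ (rows.getD i' []).length) ∧
      ∀ r ∈ rows, ∀ x ∈ r, (rows.getD (k / 10) []).getD (k % 10) 0 ≤ x := by
    obtain ⟨i, hi6, j, hj10, hjlen, hbefore, hlowb⟩ := hex
    rw [hget i hi6] at hjlen hlowb
    refine ⟨10 * i + j, by omega, ?_, ?_, ?_⟩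
    · have : (10 * i + j) / 10 = i := by omega
      rw [this]; have : (10 * i + j) % 10 = j := by omega
      rw [this]; exact hjlen
    · intro i' hi'
      have : (10 * i + j) / 10 = i := by omega
      rw [this] at hi'
      rw [← hget i' (by omega)]
      exact hbefore i' hi'
    · have h1 : (10 * i + j) / 10 = i := by omega
      have h2 : (10 * i + j) % 10 = j := by omega
      rw [h1, h2]; exact hlowb
  set k0 := Nat.find hexP with hk0
  obtain ⟨hk60, hjlen, hbefore, hlowb⟩ := Nat.find_spec hexP
  set i0 := k0 / 10 with hi0
  set j0 := k0 % 10 with hj0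
  have hi6 : i0 < 6 := by omega
  have hj10 : j0 < 10 := by omega
  have hfirstR : ∀ i : Nat, i < i0 → ∀ j : Nat, j < 10 →
      (rows.getD i []).getD j 0 ≠ (rows.getD i0 []).getD j0 0 := by
    intro i hi j hj heq
    have hk' : 10 * i + j < k0 := by omega
    refine Nat.find_min hexP hk' ⟨by omega, ?_, ?_, ?_⟩ <;>
      (try rw [show (10 * i + j) / 10 = i from by omega]) <;>
      (try rw [show (10 * i + j) % 10 = j from by omega])
    · have := hbefore i hi; omega
    · intro i' hi'; exact hbefore i' (by omega)
    · rw [heq]; exact hlowb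
  have hfirstC : ∀ j : Nat, j < j0 →
      (rows.getD i0 []).getD j 0 ≠ (rows.getD i0 []).getD j0 0 := by
    intro j hj heq
    have hk' : 10 * i0 + j < k0 := by omega
    refine Nat.find_min hexP hk' ⟨by omega, ?_, ?_, ?_⟩ <;>
      (try rw [show (10 * i0 + j) / 10 = i0 from by omega]) <;>
      (try rw [show (10 * i0 + j) % 10 = j from by omega])
    · omega
    · intro i' hi'; exact hbefore i' (by omega)
    · rw [heq]; exact hlowb
  exact pvMain r0 r1 r2 r3 r4 r5 matriz hne i0 j0 hi6 hj10 hjlen hbefore hlowb hfirstR hfirstC
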